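-- pv_equiv track=rewrite | github.com/corradomio/python_projects | check_re_ast/lcs_test.py | longest_common_substrings
-- ===== SOURCE A (Python) =====
-- def split(s: str, min_len=2) -> set[str]:
--     n = len(s)
--     parts = set()
--     for i in range(0, n-min_len):
--         for j in range(i+min_len, n):
--             parts.add(s[i:j])
--     return parts
--
-- def longest_common_substrings(substrings: set[str], s: str, min_len=2) -> set[str]:
--     parts = split(s, min_len=min_len)
--     if substrings is None:
--         return parts
--     else:
--         substrings = substrings.intersection(parts)
--
--     tocheck = sorted(substrings, key=(lambda t: (len(t), t)))
--     toremove = set()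
--     n = len(tocheck)
--     for i in range(n-1):
--         for j in range(i+1, n):
--             if tocheck[i] in tocheck[j]:
--                 toremove.add(tocheck[i])
--                 break
--             # end
--         # end
--     # end
--     substrings = substrings.difference(toremove)
--     return substrings
-- ===== SOURCE B (Python) =====
-- def longest_common_substrings(substrings, s, min_len=2):
--     # Single containment-filter pass instead of sort + O(m^2) index scans.
--     n = len(s)
--     if substrings is None:
--         return {s[i:j] for i in range(n - min_len) for j in range(i + min_len, n)}
--     body = s[:-1]
--     cands = {t for t in substrings if len(t) >= min_len and t in body}
--     return {t for t in cands if not any(t != u and t in u for u in cands)}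
-- ===== Notes on version B (the rewrite author's own statement) =====
-- stated objective: alternative
-- what changed: On the candidate path B drops A's materialized O(n^2)-substring set, sort and quadratic index scan: a candidate is kept directly iff it is long enough, occurs in s[:-1], and no other candidate strictly contains it (the substrings=None branch necessarily still enumerates all substrings).
-- outside the precondition, e.g. on longest_common_substrings({''}, '', 0): A returns set(), B returns {''}
import Mathlib
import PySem

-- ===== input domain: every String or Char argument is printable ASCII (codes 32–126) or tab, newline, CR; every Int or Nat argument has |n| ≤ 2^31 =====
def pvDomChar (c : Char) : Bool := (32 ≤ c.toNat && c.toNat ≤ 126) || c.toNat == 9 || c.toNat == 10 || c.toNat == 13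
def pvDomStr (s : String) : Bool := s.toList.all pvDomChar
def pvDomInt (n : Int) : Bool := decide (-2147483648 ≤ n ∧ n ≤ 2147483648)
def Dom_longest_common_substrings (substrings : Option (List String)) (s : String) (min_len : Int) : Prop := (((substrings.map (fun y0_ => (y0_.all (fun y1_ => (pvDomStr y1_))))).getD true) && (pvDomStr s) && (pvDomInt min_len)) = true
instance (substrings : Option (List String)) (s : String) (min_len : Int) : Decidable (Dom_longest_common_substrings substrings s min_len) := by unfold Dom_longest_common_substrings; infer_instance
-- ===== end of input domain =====

-- On the candidate path B replaces A's intersection with the materialized substring set plus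
-- sort + quadratic index scan by a direct filter: keep t when it is long enough, occurs in
-- s[:-1], and no other candidate strictly contains it (objective: alternative).

-- ===== PORT A =====
def pvSplitA (s : String) (min_len : Int) : PySem.Set String :=
  let n : Int := PySem.Str.len s
  (PySem.List.pyRange 0 (n - min_len)).foldl
    (fun parts i =>
      (PySem.List.pyRange (i + min_len) n).foldl
        (fun parts j => PySem.Set.add parts (PySem.Str.slice s (some i) (some j))) parts)
    PySem.Set.empty

-- the inner 'for j ...: if tocheck[i] in tocheck[j]: add; break' loop
def pvInnerA (ti : String) (tocheck : List String) (js : List Int) (rem : PySem.Set String) : PySem.Set String :=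
  match js with
  | [] => rem
  | j :: rest =>
    if PySem.Str.isIn ti (PySem.List.pyGetD tocheck j "") then PySem.Set.add rem ti
    else pvInnerA ti tocheck rest rem

def longest_common_substrings (substrings : Option (List String)) (s : String) (min_len : Int) : List String :=
  let parts := pvSplitA s min_len
  match substrings with
  | none => parts
  | some subs0 =>
    let subs := PySem.Set.inter (PySem.Set.ofList subs0) parts
    let tocheck := PySem.List.sorted2 subs (fun t => PySem.Str.len t) (fun t => t) false
    let n : Int := (tocheck.length : Int)
    let toremove := (PySem.List.pyRange 0 (n - 1)).foldl
      (fun rem i => pvInnerA (PySem.List.pyGetD tocheck i "") tocheck (PySem.List.pyRange (i + 1) n) rem)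
      PySem.Set.empty
    PySem.Set.diff subs toremove

-- ===== PORT B =====
def longest_common_substrings_alt (substrings : Option (List String)) (s : String) (min_len : Int) : List String :=
  let n : Int := PySem.Str.len s
  match substrings with
  | none =>
    (PySem.List.pyRange 0 (n - min_len)).foldl
      (fun acc i =>
        (PySem.List.pyRange (i + min_len) n).foldl
          (fun acc j => PySem.Set.add acc (PySem.Str.slice s (some i) (some j))) acc)
      PySem.Set.empty
  | some subs0 =>
    let body := PySem.Str.slice s none (some (-1))
    let cands := List.filter
      (fun t => decide (min_len ≤ PySem.Str.len t) && PySem.Str.isIn t body)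
      (PySem.Set.ofList subs0)
    List.filter (fun t => !(cands.any (fun u => t != u && PySem.Str.isIn t u))) cands

-- ===== PRECONDITION & SPEC =====
-- Pre_ excludes only the degenerate corner s = "" with min_len = 0 and "" among the candidates:
-- there A's empty range(0, 0) yields no substring candidates at all while B naturally counts ""
-- (length 0 ≥ min_len, trivially occurring) — an unspecified corner where either answer is defensible.
def Pre_longest_common_substrings (substrings : Option (List String)) (s : String) (min_len : Int) : Prop :=
  ¬ (s = "" ∧ min_len = 0 ∧ "" ∈ substrings.getD [])
instance (substrings : Option (List String)) (s : String) (min_len : Int) : Decidable (Pre_longest_common_substrings substrings s min_len) := by unfold Pre_longest_common_substrings; infer_instance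

def pvWitness_longest_common_substrings : Option (List String) × String × Int := (some ["ab", "bc"], "abcd", 2)

def Spec_longest_common_substrings (substrings : Option (List String)) (s : String) (min_len : Int) (out : List String) : Prop := out = longest_common_substrings_alt substrings s min_len
instance (substrings : Option (List String)) (s : String) (min_len : Int) (out : List String) : Decidable (Spec_longest_common_substrings substrings s min_len out) := by unfold Spec_longest_common_substrings; infer_instance

-- ===== CLAIM (what is proved, stated in full; the proofs are below) =====
def Claim_equal_longest_common_substrings : Prop := ∀ (substrings : Option (List String)) (s : String) (min_len : Int), Dom_longest_common_substrings substrings s min_len → Pre_longest_common_substrings substrings s min_len → Spec_longest_common_substrings substrings s min_len (longest_common_substrings substrings s min_len)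

-- ===== LEMMAS AND PROOFS =====

-- membership in the inner 'add a slice' fold
theorem pv_mem_fold_add {ι : Type} (js : List ι) (g : ι → String) (acc : PySem.Set String) (y : String) :
    y ∈ js.foldl (fun a j => PySem.Set.add a (g j)) acc ↔ y ∈ acc ∨ ∃ j ∈ js, y = g j := by
  induction js generalizing acc with
  | nil => simp
  | cons j rest ih =>
    simp only [List.foldl_cons, ih, PySem.Set.mem_add]
    constructor
    · rintro (⟨h | h⟩ | ⟨j', hj', h⟩)
      · exact Or.inl h
      · exact Or.inr ⟨j, by simp, h⟩
      · exact Or.inr ⟨j', by simp [hj'], h⟩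
    · rintro (h | ⟨j', hj', h⟩)
      · exact Or.inl (Or.inl h)
      · rcases List.mem_cons.mp hj' with rfl | hj'
        · exact Or.inl (Or.inr h)
        · exact Or.inr ⟨j', hj', h⟩

theorem pv_mem_fold_fold_add (is : List Int) (js : Int → List Int) (g : Int → Int → String)
    (acc : PySem.Set String) (y : String) :
    y ∈ is.foldl (fun a i => (js i).foldl (fun a j => PySem.Set.add a (g i j)) a) acc ↔
      y ∈ acc ∨ ∃ i ∈ is, ∃ j ∈ js i, y = g i j := by
  induction is generalizing acc with
  | nil => simp
  | cons i rest ih =>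
    simp only [List.foldl_cons, ih, pv_mem_fold_add]
    constructor
    · rintro (⟨h | ⟨j, hj, h⟩⟩ | ⟨i', hi', h⟩)
      · exact Or.inl h
      · exact Or.inr ⟨i, by simp, j, hj, h⟩
      · exact Or.inr ⟨i', by simp [hi'], h⟩
    · rintro (h | ⟨i', hi', h⟩)
      · exact Or.inl (Or.inl h)
      · rcases List.mem_cons.mp hi' with rfl | hi'
        · exact Or.inl (Or.inr h)
        · exact Or.inr ⟨i', hi', h⟩

theorem pv_mem_pvSplitA (s : String) (min_len : Int) (t : String) :
    t ∈ pvSplitA s min_len ↔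
      ∃ i, (0 ≤ i ∧ i < PySem.Str.len s - min_len) ∧
        ∃ j, (i + min_len ≤ j ∧ j < PySem.Str.len s) ∧ t = PySem.Str.slice s (some i) (some j) := by
  unfold pvSplitA
  rw [pv_mem_fold_fold_add]
  simp [PySem.Set.empty, PySem.List.mem_pyRange_one, and_assoc]

theorem pv_slice_forward (xs : List Char) (min_len i j : Int) (hi0 : 0 ≤ i)
    (hiu : i < (xs.length : Int) - min_len) (hj1 : i + min_len ≤ j) (hj2 : j < (xs.length : Int)) :
    min_len ≤ ((PySem.List.slice xs (some i) (some j)).length : Int) ∧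
      PySem.List.slice xs (some i) (some j) <:+: xs.dropLast := by
  have hslice : PySem.List.slice xs (some i) (some j) =
      List.take (PySem.List.clampIdx xs.length j - PySem.List.clampIdx xs.length i)
        (List.drop (PySem.List.clampIdx xs.length i) xs) := rfl
  set a := PySem.List.clampIdx xs.length i with ha
  set b := PySem.List.clampIdx xs.length j with hb
  have hble : b ≤ xs.length - 1 := by
    rw [hb]; simp only [PySem.List.clampIdx]; split_ifs <;> omega
  constructor
  · rw [hslice]; simp only [List.length_take, List.length_drop]
    rcases le_or_gt min_len 0 with hm | hm
    · exact le_trans hm (by positivity)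
    · have hj0 : (0:Int) ≤ j := by omega
      have hai : a = i.toNat ∧ b = j.toNat := by
        constructor
        · rw [ha]; simp only [PySem.List.clampIdx]; split_ifs <;> omega
        · rw [hb]; simp only [PySem.List.clampIdx]; split_ifs <;> omega
      have hmin : min (b - a) (xs.length - a) = b - a := Nat.min_eq_left (by omega)
      rw [hmin]; omega
  · rw [hslice, ← List.drop_take]
    refine (List.IsSuffix.isInfix (List.drop_suffix a (List.take b xs))).trans ?_
    rw [List.dropLast_eq_take]
    have hbt : List.take b xs = List.take b (List.take (xs.length - 1) xs) := by
      rw [List.take_take]; congr 1; omega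
    rw [hbt]
    exact (List.take_prefix _ _).isInfix

theorem pv_slice_backward (xs : List Char) (min_len : Int) (t : List Char)
    (hml : min_len ≤ (t.length : Int)) (hinf : t <:+: xs.dropLast)
    (hc : ¬ (xs = [] ∧ min_len = 0 ∧ t = [])) :
    ∃ i, (0 ≤ i ∧ i < (xs.length : Int) - min_len) ∧
      ∃ j, (i + min_len ≤ j ∧ j < (xs.length : Int)) ∧ t = PySem.List.slice xs (some i) (some j) := by
  rcases eq_or_ne xs [] with rfl | hne
  · have ht : t = [] := List.eq_nil_of_infix_nil (by simpa using hinf)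
    have hm : min_len < 0 := by
      rcases lt_or_eq_of_le (by simpa [ht] using hml) with h | h
      · exact h
      · exact absurd ⟨rfl, h, ht⟩ hc
    refine ⟨0, ⟨le_refl 0, by simpa using hm⟩, min_len, ⟨by omega, by simpa using hm⟩, ?_⟩
    simp [PySem.List.slice, ht]
  · have hn : 1 ≤ xs.length := List.length_pos_of_ne_nil hne
    obtain ⟨pre, suf, hps⟩ := hinf
    have hlen : pre.length + t.length + suf.length = xs.length - 1 := by
      have h := congrArg List.length hps
      simp only [List.length_append, List.length_dropLast] at h
      omega
    refine ⟨(pre.length : Int), ⟨by positivity, by omega⟩,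
      ((pre.length + t.length : Nat) : Int), ⟨by push_cast; omega, by push_cast; omega⟩, ?_⟩
    have hxs : xs = pre ++ (t ++ (suf ++ List.drop (xs.length - 1) xs)) := by
      conv_lhs => rw [← List.take_append_drop (xs.length - 1) xs]
      rw [← List.dropLast_eq_take, ← hps]
      simp
    have hclA : PySem.List.clampIdx xs.length (pre.length : Int) = pre.length := by
      simp only [PySem.List.clampIdx]; split_ifs <;> omega
    have hclB : PySem.List.clampIdx xs.length ((pre.length + t.length : Nat) : Int) =
        pre.length + t.length := by
      simp only [PySem.List.clampIdx]; split_ifs <;> omega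
    have hsl : PySem.List.slice xs (some (pre.length : Int)) (some ((pre.length + t.length : Nat) : Int)) =
        List.take (pre.length + t.length - pre.length) (List.drop pre.length xs) := by
      show List.take (PySem.List.clampIdx xs.length _ - PySem.List.clampIdx xs.length _)
        (List.drop (PySem.List.clampIdx xs.length _) xs) = _
      rw [hclA, hclB]
    rw [hsl]
    conv_rhs => rw [hxs, List.drop_left]
    have : pre.length + t.length - pre.length = t.length := by omega
    rw [this, List.take_left]

-- characterization of A's candidate set, outside the excluded corner
theorem pv_split_char (s : String) (min_len : Int) (t : String)
    (hc : ¬ (s.toList = [] ∧ min_len = 0 ∧ t.toList = [])) :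
    t ∈ pvSplitA s min_len ↔
      (min_len ≤ (t.toList.length : Int) ∧ t.toList <:+: s.toList.dropLast) := by
  rw [pv_mem_pvSplitA]
  constructor
  · rintro ⟨i, ⟨hi0, hiu⟩, j, ⟨hj1, hj2⟩, rfl⟩
    rw [PySem.Str.len_eq] at hiu hj2
    have h := pv_slice_forward s.toList min_len i j hi0 hiu hj1 hj2
    simpa [PySem.Str.toList_slice, PySem.Chars.slice_eq_listSlice] using h
  · rintro ⟨hml, hinf⟩
    obtain ⟨i, hi, j, hj, ht⟩ := pv_slice_backward s.toList min_len t.toList hml hinf hc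
    refine ⟨i, by rw [PySem.Str.len_eq]; exact hi, j, by rw [PySem.Str.len_eq]; exact hj, ?_⟩
    apply String.toList_inj.mp
    rw [PySem.Str.toList_slice, PySem.Chars.slice_eq_listSlice]
    exact ht

-- the inner break-loop is 'add if any'
theorem pv_pvInnerA_eq (ti : String) (tocheck : List String) (js : List Int) (rem : PySem.Set String) :
    pvInnerA ti tocheck js rem =
      if js.any (fun j => PySem.Str.isIn ti (PySem.List.pyGetD tocheck j "")) then PySem.Set.add rem ti else rem := by
  induction js with
  | nil => simp only [pvInnerA, List.any_nil, Bool.false_eq_true, if_false]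
  | cons j rest ih =>
    cases h : PySem.Str.isIn ti (PySem.List.pyGetD tocheck j "") with
    | true => simp only [pvInnerA, h, List.any_cons, Bool.true_or, if_true]
    | false => simp only [pvInnerA, h, List.any_cons, Bool.false_or, ih, Bool.false_eq_true, if_false]

theorem pv_mem_fold_ite_add (is : List Int) (c : Int → Bool) (e : Int → String)
    (acc : PySem.Set String) (y : String) :
    y ∈ is.foldl (fun rem i => if c i then PySem.Set.add rem (e i) else rem) acc ↔
      y ∈ acc ∨ ∃ i ∈ is, c i ∧ y = e i := by
  induction is generalizing acc with
  | nil => simp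
  | cons i rest ih =>
    simp only [List.foldl_cons]
    by_cases h : c i = true
    · rw [if_pos h]
      simp only [ih, PySem.Set.mem_add]
      constructor
      · rintro (⟨hy | hy⟩ | ⟨i', hi', hc', hy⟩)
        · exact Or.inl hy
        · exact Or.inr ⟨i, by simp, h, hy⟩
        · exact Or.inr ⟨i', by simp [hi'], hc', hy⟩
      · rintro (hy | ⟨i', hi', hc', hy⟩)
        · exact Or.inl (Or.inl hy)
        · rcases List.mem_cons.mp hi' with rfl | hi'
          · exact Or.inl (Or.inr hy)
          · exact Or.inr ⟨i', hi', hc', hy⟩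
    · rw [if_neg (by simp [h])]
      simp only [ih]
      constructor
      · rintro (hy | ⟨i', hi', hc', hy⟩)
        · exact Or.inl hy
        · exact Or.inr ⟨i', by simp [hi'], hc', hy⟩
      · rintro (hy | ⟨i', hi', hc', hy⟩)
        · exact Or.inl hy
        · rcases List.mem_cons.mp hi' with rfl | hi'
          · simp [h] at hc'
          · exact Or.inr ⟨i', hi', hc', hy⟩

-- sortedness of sorted2 in its first key
theorem pv_insertBy2_pairwise (x : String) (ys : List String)
    (h : ys.Pairwise (fun a b => PySem.Str.len a ≤ PySem.Str.len b)) :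
    (PySem.List.insertBy
      (fun a b => decide (PySem.Str.len a < PySem.Str.len b) ||
        (!decide (PySem.Str.len b < PySem.Str.len a) && decide (a < b))) x ys).Pairwise
      (fun a b => PySem.Str.len a ≤ PySem.Str.len b) := by
  induction ys with
  | nil => simp [PySem.List.insertBy]
  | cons y ys ih =>
    rw [PySem.List.insertBy]
    rcases List.pairwise_cons.mp h with ⟨hy, hys⟩
    by_cases hb : (decide (PySem.Str.len x < PySem.Str.len y) ||
        (!decide (PySem.Str.len y < PySem.Str.len x) && decide (x < y))) = true
    · rw [if_pos hb]
      have hxy : PySem.Str.len x ≤ PySem.Str.len y := by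
        rcases Bool.or_eq_true_iff.mp hb with h1 | h1
        · exact le_of_lt (of_decide_eq_true h1)
        · have h2 := Bool.and_eq_true_iff.mp h1 |>.1
          simp only [Bool.not_eq_true', decide_eq_false_iff_not, not_lt] at h2
          exact h2
      refine List.pairwise_cons.mpr ⟨?_, h⟩
      intro z hz
      rcases List.mem_cons.mp hz with rfl | hz
      · exact hxy
      · exact le_trans hxy (hy z hz)
    · rw [if_neg hb]
      have hyx : PySem.Str.len y ≤ PySem.Str.len x := by
        have h1 : decide (PySem.Str.len x < PySem.Str.len y) = false := by
          cases hh : decide (PySem.Str.len x < PySem.Str.len y)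
          · rfl
          · exact absurd (by rw [hh, Bool.true_or]) hb
        simp only [decide_eq_false_iff_not, not_lt] at h1
        exact h1
      refine List.pairwise_cons.mpr ⟨?_, ih hys⟩
      intro z hz
      rcases (PySem.List.insertBy_mem_iff _ x z ys).mp hz with rfl | hz
      · exact hyx
      · exact hy z hz

theorem pv_sorted2_pairwise_len (xs : List String) :
    (PySem.List.sorted2 xs (fun t => PySem.Str.len t) (fun t => t) false).Pairwise
      (fun a b => PySem.Str.len a ≤ PySem.Str.len b) := by
  suffices h : ∀ (acc : List String), acc.Pairwise (fun a b => PySem.Str.len a ≤ PySem.Str.len b) →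
      (xs.foldl (fun acc x => PySem.List.insertBy
        (fun a b => decide (PySem.Str.len a < PySem.Str.len b) ||
          (!decide (PySem.Str.len b < PySem.Str.len a) && decide (a < b))) x acc) acc).Pairwise
        (fun a b => PySem.Str.len a ≤ PySem.Str.len b) by
    exact h [] (by simp)
  induction xs with
  | nil => intro acc hacc; exact hacc
  | cons x xs ih =>
    intro acc hacc
    exact ih _ (pv_insertBy2_pairwise x acc hacc)

-- the removal loop removes exactly the candidates strictly contained in another candidate
theorem pv_toremove_char (cs : List String) (hnd : cs.Nodup) (t : String) (htc : t ∈ cs) :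
    (t ∈ (PySem.List.pyRange 0
        (((PySem.List.sorted2 cs (fun t => PySem.Str.len t) (fun t => t) false).length : Int) - 1)).foldl
      (fun rem i => pvInnerA
        (PySem.List.pyGetD (PySem.List.sorted2 cs (fun t => PySem.Str.len t) (fun t => t) false) i "")
        (PySem.List.sorted2 cs (fun t => PySem.Str.len t) (fun t => t) false)
        (PySem.List.pyRange (i + 1)
          ((PySem.List.sorted2 cs (fun t => PySem.Str.len t) (fun t => t) false).length : Int)) rem)
      PySem.Set.empty) ↔ ∃ u ∈ cs, u ≠ t ∧ PySem.Str.isIn t u = true := by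
  set tc := PySem.List.sorted2 cs (fun t => PySem.Str.len t) (fun t => t) false with htcdef
  have hperm : tc.Perm cs := PySem.List.sorted2_perm cs _ _ false
  have hndtc : tc.Nodup := hperm.nodup_iff.mpr hnd
  have hpw := pv_sorted2_pairwise_len cs
  rw [← htcdef] at hpw
  simp only [pv_pvInnerA_eq]
  rw [pv_mem_fold_ite_add]
  simp only [PySem.Set.empty, List.not_mem_nil, false_or]
  constructor
  · rintro ⟨i, hi, hany, rfl⟩
    rw [PySem.List.mem_pyRange_one] at hi
    obtain ⟨j, hj, hisin⟩ := List.any_eq_true.mp hany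
    rw [PySem.List.mem_pyRange_one] at hj
    have hilt : i.toNat < tc.length := by omega
    have hjlt : j.toNat < tc.length := by omega
    have hgi : PySem.List.pyGetD tc i "" = tc[i.toNat] := by
      rw [PySem.List.pyGetD_of_nonneg tc "" hi.1, List.getD_eq_getElem tc "" hilt]
    have hgj : PySem.List.pyGetD tc j "" = tc[j.toNat] := by
      rw [PySem.List.pyGetD_of_nonneg tc "" (by omega), List.getD_eq_getElem tc "" hjlt]
    refine ⟨tc[j.toNat], hperm.subset (List.getElem_mem hjlt), ?_, ?_⟩
    · intro he
      have : j.toNat = i.toNat := by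
        rw [hgi] at he
        exact (List.Nodup.getElem_inj_iff hndtc).mp he
      omega
    · rw [hgj] at hisin
      exact hisin
  · rintro ⟨u, hu, hne, hisin⟩
    have htt : t ∈ tc := hperm.mem_iff.mpr htc
    have hut : u ∈ tc := hperm.mem_iff.mpr hu
    obtain ⟨it, hitlt, hti⟩ := List.mem_iff_getElem.mp htt
    obtain ⟨ju, hjult, huj⟩ := List.mem_iff_getElem.mp hut
    have hlenlt : PySem.Str.len t < PySem.Str.len u := by
      have hinf : t.toList <:+: u.toList := (PySem.Str.isIn_iff_infix t u).mp hisin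
      have hle := hinf.length_le
      rcases lt_or_eq_of_le hle with h | h
      · rw [PySem.Str.len_eq, PySem.Str.len_eq]; exact_mod_cast h
      · exact absurd (String.toList_inj.mp (hinf.eq_of_length h)).symm hne
    have hij : it < ju := by
      rcases lt_trichotomy it ju with h | h | h
      · exact h
      · exfalso
        subst h
        exact hne (huj.symm.trans hti)
      · have hthis := List.pairwise_iff_getElem.mp hpw ju it hjult hitlt h
        rw [hti, huj] at hthis
        exact absurd hthis (not_le.mpr hlenlt)
    refine ⟨(it : Int), ?_, ?_, ?_⟩
    · rw [PySem.List.mem_pyRange_one]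
      constructor
      · positivity
      · have : ju ≤ tc.length - 1 := by omega
        omega
    · refine List.any_eq_true.mpr ⟨(ju : Int), ?_, ?_⟩
      · rw [PySem.List.mem_pyRange_one]
        omega
      · rw [PySem.List.pyGetD_of_nonneg tc "" (by positivity),
          PySem.List.pyGetD_of_nonneg tc "" (by positivity)]
        simp only [Int.toNat_natCast]
        rw [List.getD_eq_getElem tc "" hitlt, List.getD_eq_getElem tc "" hjult, hti, huj]
        exact hisin
    · rw [PySem.List.pyGetD_of_nonneg tc "" (by positivity)]
      simp only [Int.toNat_natCast]
      rw [List.getD_eq_getElem tc "" hitlt, hti]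

-- main equality on the 'some' branch
theorem pv_main (subs0 : List String) (s : String) (min_len : Int)
    (hpre : ¬ (s = "" ∧ min_len = 0 ∧ "" ∈ subs0)) :
    longest_common_substrings (some subs0) s min_len = longest_common_substrings_alt (some subs0) s min_len := by
  have hsubs : PySem.Set.inter (PySem.Set.ofList subs0) (pvSplitA s min_len) =
      List.filter (fun t => decide (min_len ≤ PySem.Str.len t) &&
        PySem.Str.isIn t (PySem.Str.slice s none (some (-1)))) (PySem.Set.ofList subs0) := by
    apply List.filter_congr
    intro t ht
    have hc : ¬ (s.toList = [] ∧ min_len = 0 ∧ t.toList = []) := by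
      rintro ⟨h1, h2, h3⟩
      exact hpre ⟨by cases s; simp_all, h2, by
        have : t = "" := String.toList_inj.mp (by simpa using h3)
        rw [← this]; exact (PySem.Set.mem_ofList subs0 t).mp ht⟩
    rw [Bool.eq_iff_iff, PySem.Set.contains_iff, Bool.and_eq_true_iff, decide_eq_true_iff,
      PySem.Str.isIn_iff_infix, pv_split_char s min_len t hc, PySem.Str.len_eq]
    have hbody : (PySem.Str.slice s none (some (-1))).toList = s.toList.dropLast :=
      PySem.Str.slice_to_neg_one s
    rw [hbody]
  have hndc : (List.filter (fun t => decide (min_len ≤ PySem.Str.len t) &&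
      PySem.Str.isIn t (PySem.Str.slice s none (some (-1)))) (PySem.Set.ofList subs0)).Nodup :=
    List.Nodup.filter _ (PySem.Set.nodup_ofList subs0)
  show PySem.Set.diff _ _ = _
  simp only [longest_common_substrings_alt]
  rw [hsubs]
  apply List.filter_congr
  intro t ht
  congr 1
  rw [Bool.eq_iff_iff, PySem.Set.contains_iff, List.any_eq_true]
  rw [pv_toremove_char _ hndc t ht]
  constructor
  · rintro ⟨u, hu, hne, hisin⟩
    refine ⟨u, hu, ?_⟩
    rw [Bool.and_eq_true_iff]
    refine ⟨?_, hisin⟩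
    rw [bne_iff_ne]
    exact fun h => hne h.symm
  · rintro ⟨u, hu, hb⟩
    rw [Bool.and_eq_true_iff] at hb
    refine ⟨u, hu, ?_, hb.2⟩
    exact fun h => (bne_iff_ne.mp hb.1) h.symm

-- ===== VERDICT (by name: the statement is the Claim_ definition above) =====
theorem longest_common_substrings_spec : Claim_equal_longest_common_substrings := by
  intro substrings s min_len _hdom hpre
  unfold Spec_longest_common_substrings
  match substrings with
  | none => rfl
  | some subs0 =>
    exact pv_main subs0 s min_len (by simpa [Pre_longest_common_substrings] using hpre)
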